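-- pv_equiv track=rewrite | github.com/frants-jeon/baekjoon | python_solved/level_15,23_DynamicProgramming/baekjoon_9184.py | w
-- ===== SOURCE A (Python) =====
-- dp = [[[0 for _ in range(21)] for _ in range(21)] for _ in range(21)]
--
-- def w(a, b, c):
--   if a <= 0 or b <= 0 or c <= 0:
--     return 1
--   if a > 20 or b > 20 or c > 20:
--     dp[20][20][20] = w(20, 20, 20)
--     return dp[20][20][20]
--   if dp[a][b][c] != 0: return dp[a][b][c]
--   if a < b and b < c:
--     dp[a][b][c - 1] = w(a, b, c - 1)
--     dp[a][b - 1][c - 1] = w(a, b - 1, c - 1)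
--     dp[a][b - 1][c] = w(a, b - 1, c)
--     return dp[a][b][c - 1] + dp[a][b - 1][c - 1] - dp[a][b - 1][c]
--   else:
--     dp[a - 1][b][c] = w(a - 1, b, c)
--     dp[a - 1][b - 1][c] = w(a - 1, b - 1, c)
--     dp[a - 1][b][c - 1] = w(a - 1, b, c - 1)
--     dp[a - 1][b - 1][c - 1] = w(a - 1, b - 1, c - 1)
--     return dp[a - 1][b][c] + dp[a - 1][b - 1][c] + dp[a - 1][b][c - 1] - dp[a - 1][b - 1][c - 1]
-- ===== SOURCE B (Python) =====
-- def _val(t, x, y, z):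
--     return 1 if x <= 0 or y <= 0 or z <= 0 else t[x][y][z]
--
-- def _build():
--     t = [[[0] * 21 for _ in range(21)] for _ in range(21)]
--     for a in range(1, 21):
--         for b in range(1, 21):
--             for c in range(1, 21):
--                 if a < b and b < c:
--                     t[a][b][c] = (_val(t, a, b, c - 1)
--                                   + _val(t, a, b - 1, c - 1)
--                                   - _val(t, a, b - 1, c))
--                 else:
--                     t[a][b][c] = (_val(t, a - 1, b, c)
--                                   + _val(t, a - 1, b - 1, c)
--                                   + _val(t, a - 1, b, c - 1)
--                                   - _val(t, a - 1, b - 1, c - 1))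
--     return t
--
-- _T = _build()
--
-- def w(a, b, c):
--     if a <= 0 or b <= 0 or c <= 0:
--         return 1
--     if a > 20 or b > 20 or c > 20:
--         return _T[20][20][20]
--     return _T[a][b][c]
-- ===== Notes on version B (the rewrite author's own statement) =====
-- stated objective: alternative
-- what changed: Replaced the memoized top-down recursion with side effects on a global dp array by a bottom-up tabulation: the 21x21x21 table is filled once by a triple loop in increasing index order, and w becomes a recursion-free dispatcher (guards, clamp to table[20][20][20], table lookup).
import Mathlib
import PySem

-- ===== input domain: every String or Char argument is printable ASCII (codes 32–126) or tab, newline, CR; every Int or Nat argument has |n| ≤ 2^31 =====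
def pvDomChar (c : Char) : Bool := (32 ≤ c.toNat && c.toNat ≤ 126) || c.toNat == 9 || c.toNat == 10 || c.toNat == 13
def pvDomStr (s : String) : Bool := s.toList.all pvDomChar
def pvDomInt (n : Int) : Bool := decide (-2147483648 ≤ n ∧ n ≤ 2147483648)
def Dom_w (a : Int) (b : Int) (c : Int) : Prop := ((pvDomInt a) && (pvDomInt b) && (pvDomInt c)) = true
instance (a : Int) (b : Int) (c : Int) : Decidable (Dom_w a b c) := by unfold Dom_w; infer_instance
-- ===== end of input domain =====

-- B replaces A's memoized top-down recursion by a one-time bottom-up tabulation plus a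
-- recursion-free dispatcher; the equivalence is about the RETURN value (A additionally
-- mutates a module-level dp array; B fills its own table once at module load).

-- ===== PORT A =====
-- A's 3-D dp list is a List (List (List Int)); every index A ever uses is in 0..20, where
-- these getD/set accessors are exact for Python list read/assignment.
def pvGet3 (m : List (List (List Int))) (x y z : Int) : Int :=
  ((m.getD x.toNat []).getD y.toNat []).getD z.toNat 0

def pvSet3 (m : List (List (List Int))) (x y z : Int) (v : Int) : List (List (List Int)) :=
  m.set x.toNat ((m.getD x.toNat []).set y.toNat
    (((m.getD x.toNat []).getD y.toNat []).set z.toNat v))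

-- dp = [[[0 for _ in range(21)] for _ in range(21)] for _ in range(21)]
def pvDp0 : List (List (List Int)) :=
  (PySem.List.pyRange 0 21 1).map (fun _ =>
    (PySem.List.pyRange 0 21 1).map (fun _ =>
      (PySem.List.pyRange 0 21 1).map (fun _ => (0 : Int))))

-- the recursive body of A, with the global dp threaded through as explicit state;
-- the Nat fuel only makes the recursion structural (fuel 1001 strictly exceeds the
-- recursion depth measure for every input, so the fuel-0 default is never reached)
def wA : Nat → Int → Int → Int → List (List (List Int)) → Int × List (List (List Int))
  | 0, _, _, _, m => (1, m)
  | fuel + 1, a, b, c, m =>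
    if a ≤ 0 ∨ b ≤ 0 ∨ c ≤ 0 then (1, m)
    else if a > 20 ∨ b > 20 ∨ c > 20 then
      let r := wA fuel 20 20 20 m
      let m2 := pvSet3 r.2 20 20 20 r.1
      (pvGet3 m2 20 20 20, m2)
    else if pvGet3 m a b c ≠ 0 then (pvGet3 m a b c, m)
    else if a < b ∧ b < c then
      let r1 := wA fuel a b (c - 1) m
      let m1 := pvSet3 r1.2 a b (c - 1) r1.1
      let r2 := wA fuel a (b - 1) (c - 1) m1
      let m2 := pvSet3 r2.2 a (b - 1) (c - 1) r2.1
      let r3 := wA fuel a (b - 1) c m2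
      let m3 := pvSet3 r3.2 a (b - 1) c r3.1
      (pvGet3 m3 a b (c - 1) + pvGet3 m3 a (b - 1) (c - 1) - pvGet3 m3 a (b - 1) c, m3)
    else
      let r1 := wA fuel (a - 1) b c m
      let m1 := pvSet3 r1.2 (a - 1) b c r1.1
      let r2 := wA fuel (a - 1) (b - 1) c m1
      let m2 := pvSet3 r2.2 (a - 1) (b - 1) c r2.1
      let r3 := wA fuel (a - 1) b (c - 1) m2
      let m3 := pvSet3 r3.2 (a - 1) b (c - 1) r3.1
      let r4 := wA fuel (a - 1) (b - 1) (c - 1) m3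
      let m4 := pvSet3 r4.2 (a - 1) (b - 1) (c - 1) r4.1
      (pvGet3 m4 (a - 1) b c + pvGet3 m4 (a - 1) (b - 1) c + pvGet3 m4 (a - 1) b (c - 1)
        - pvGet3 m4 (a - 1) (b - 1) (c - 1), m4)

def w (a : Int) (b : Int) (c : Int) : Int := (wA 1001 a b c pvDp0).1

-- ===== PORT B =====
-- def _val(t, x, y, z): return 1 if x <= 0 or y <= 0 or z <= 0 else t[x][y][z]
def bVal (t : List (List (List Int))) (x y z : Int) : Int :=
  if x ≤ 0 ∨ y ≤ 0 ∨ z ≤ 0 then 1 else pvGet3 t x y z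

-- _T = _build(): triple loop for a, b, c in range(1, 21) filling the table bottom-up
def bTable : List (List (List Int)) :=
  (PySem.List.pyRange 1 21 1).foldl (fun t a =>
    (PySem.List.pyRange 1 21 1).foldl (fun t b =>
      (PySem.List.pyRange 1 21 1).foldl (fun t c =>
        pvSet3 t a b c
          (if a < b ∧ b < c then
            bVal t a b (c - 1) + bVal t a (b - 1) (c - 1) - bVal t a (b - 1) c
          else
            bVal t (a - 1) b c + bVal t (a - 1) (b - 1) c + bVal t (a - 1) b (c - 1)
              - bVal t (a - 1) (b - 1) (c - 1))) t) t)
    (List.replicate 21 (List.replicate 21 (List.replicate 21 (0 : Int))))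

def w_alt (a : Int) (b : Int) (c : Int) : Int :=
  if a ≤ 0 ∨ b ≤ 0 ∨ c ≤ 0 then 1
  else if a > 20 ∨ b > 20 ∨ c > 20 then pvGet3 bTable 20 20 20
  else pvGet3 bTable a b c

-- ===== PRECONDITION & SPEC =====
def Spec_w (a : Int) (b : Int) (c : Int) (out : Int) : Prop := out = w_alt a b c
instance (a : Int) (b : Int) (c : Int) (out : Int) : Decidable (Spec_w a b c out) := by unfold Spec_w; infer_instance

-- ===== CLAIM (what is proved, stated in full; the proofs are below) =====
def Claim_equal_w : Prop := ∀ (a : Int) (b : Int) (c : Int), Dom_w a b c → Spec_w a b c (w a b c)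

-- ===== LEMMAS AND PROOFS =====

-- the mathematical w-function both programs compute (proof-side specification; never evaluated)
def Wspec (a b c : Int) : Int :=
  if a ≤ 0 ∨ b ≤ 0 ∨ c ≤ 0 then 1
  else if a > 20 ∨ b > 20 ∨ c > 20 then Wspec 20 20 20
  else if a < b ∧ b < c then
    Wspec a b (c - 1) + Wspec a (b - 1) (c - 1) - Wspec a (b - 1) c
  else
    Wspec (a - 1) b c + Wspec (a - 1) (b - 1) c + Wspec (a - 1) b (c - 1)
      - Wspec (a - 1) (b - 1) (c - 1)
termination_by (if a > 20 ∨ b > 20 ∨ c > 20 then 1000 else (a + b + c).toNat)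
decreasing_by all_goals (split_ifs <;> omega)

def μw (a b c : Int) : Nat := if a > 20 ∨ b > 20 ∨ c > 20 then 1000 else (a + b + c).toNat

def Shape3 (m : List (List (List Int))) : Prop :=
  m.length = 21 ∧ ∀ r ∈ m, r.length = 21 ∧ ∀ q ∈ r, q.length = 21

def Ix (x : Int) : Prop := 0 ≤ x ∧ x ≤ 20

lemma getD_rep {α : Type} (n : Nat) (a d : α) (i : Nat) :
    (List.replicate n a).getD i d = if i < n then a else d := by
  rw [List.getD_eq_getElem?_getD, List.getElem?_replicate]
  split <;> rfl

lemma get3_rep0 (x y z : Int) :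
    pvGet3 (List.replicate 21 (List.replicate 21 (List.replicate 21 (0 : Int)))) x y z = 0 := by
  unfold pvGet3
  rw [getD_rep]
  split
  · rw [getD_rep]; split
    · rw [getD_rep]; split <;> rfl
    · rfl
  · rfl

lemma shape_rep0 :
    Shape3 (List.replicate 21 (List.replicate 21 (List.replicate 21 (0 : Int)))) := by
  refine ⟨by simp, ?_⟩
  intro r hr
  rw [List.eq_of_mem_replicate hr]
  refine ⟨by simp, ?_⟩
  intro q hq
  rw [List.eq_of_mem_replicate hq]
  simp

lemma getD_set_self {α : Type} (l : List α) (i : Nat) (a d : α) (h : i < l.length) :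
    (l.set i a).getD i d = a := by
  rw [List.getD_eq_getElem _ d (by simpa using h)]
  exact List.getElem_set_self _

lemma getD_set_ne {α : Type} (l : List α) (i j : Nat) (a d : α) (h : i ≠ j) :
    (l.set i a).getD j d = l.getD j d := by
  rw [List.getD_eq_getElem?_getD, List.getElem?_set_ne h, ← List.getD_eq_getElem?_getD]

lemma shape_set3 (m : List (List (List Int))) (x y z : Int) (v : Int)
    (hm : Shape3 m) (hx : Ix x) (hy : Ix y) (hz : Ix z) : Shape3 (pvSet3 m x y z v) := by
  obtain ⟨hx1, hx2⟩ := hx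
  obtain ⟨hy1, hy2⟩ := hy
  obtain ⟨hz1, hz2⟩ := hz
  obtain ⟨hlen, hrow⟩ := hm
  have hxlt : x.toNat < m.length := by omega
  have hR : m.getD x.toNat [] = m[x.toNat] := List.getD_eq_getElem m [] hxlt
  have hRmem : m[x.toNat] ∈ m := List.getElem_mem hxlt
  obtain ⟨hRlen, hRq⟩ := hrow _ hRmem
  have hylt : y.toNat < m[x.toNat].length := by omega
  have hQ : (m[x.toNat]).getD y.toNat [] = m[x.toNat][y.toNat] := List.getD_eq_getElem _ [] hylt
  have hQmem : m[x.toNat][y.toNat] ∈ m[x.toNat] := List.getElem_mem hylt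
  have hQlen := hRq _ hQmem
  refine ⟨by simp [pvSet3, hlen], ?_⟩
  intro r hr
  rcases List.mem_or_eq_of_mem_set hr with h | h
  · exact hrow r h
  · subst h
    refine ⟨by rw [List.length_set, hR, hRlen], ?_⟩
    intro q hq
    rcases List.mem_or_eq_of_mem_set hq with h2 | h2
    · rw [hR] at h2; exact hRq q h2
    · subst h2
      rw [List.length_set, hR, hQ, hQlen]

lemma get3_set3_self (m : List (List (List Int))) (x y z : Int) (v : Int)
    (hm : Shape3 m) (hx : Ix x) (hy : Ix y) (hz : Ix z) :
    pvGet3 (pvSet3 m x y z v) x y z = v := by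
  obtain ⟨hx1, hx2⟩ := hx
  obtain ⟨hy1, hy2⟩ := hy
  obtain ⟨hz1, hz2⟩ := hz
  obtain ⟨hlen, hrow⟩ := hm
  have hxlt : x.toNat < m.length := by omega
  have hR : m.getD x.toNat [] = m[x.toNat] := List.getD_eq_getElem m [] hxlt
  have hRmem : m[x.toNat] ∈ m := List.getElem_mem hxlt
  obtain ⟨hRlen, hRq⟩ := hrow _ hRmem
  have hylt : y.toNat < m[x.toNat].length := by omega
  have hQ : (m[x.toNat]).getD y.toNat [] = m[x.toNat][y.toNat] := List.getD_eq_getElem _ [] hylt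
  have hQmem : m[x.toNat][y.toNat] ∈ m[x.toNat] := List.getElem_mem hylt
  have hQlen := hRq _ hQmem
  unfold pvGet3 pvSet3
  rw [getD_set_self _ _ _ _ (by omega),
      getD_set_self _ _ _ _ (by rw [hR]; omega),
      getD_set_self _ _ _ _ (by rw [hR, hQ]; omega)]

lemma get3_set3_ne (m : List (List (List Int))) (x y z x' y' z' : Int) (v : Int)
    (hm : Shape3 m) (hx : Ix x) (hy : Ix y) (hz : Ix z)
    (hx' : Ix x') (hy' : Ix y') (hz' : Ix z')
    (hne : ¬(x = x' ∧ y = y' ∧ z = z')) :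
    pvGet3 (pvSet3 m x y z v) x' y' z' = pvGet3 m x' y' z' := by
  obtain ⟨hx1, hx2⟩ := hx
  obtain ⟨hy1, hy2⟩ := hy
  obtain ⟨hz1, hz2⟩ := hz
  obtain ⟨hx1', hx2'⟩ := hx'
  obtain ⟨hy1', hy2'⟩ := hy'
  obtain ⟨hz1', hz2'⟩ := hz'
  obtain ⟨hlen, hrow⟩ := hm
  have hxlt : x.toNat < m.length := by omega
  have hR : m.getD x.toNat [] = m[x.toNat] := List.getD_eq_getElem m [] hxlt
  have hRmem : m[x.toNat] ∈ m := List.getElem_mem hxlt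
  obtain ⟨hRlen, hRq⟩ := hrow _ hRmem
  unfold pvGet3 pvSet3
  by_cases hxx : x = x'
  · subst hxx
    rw [getD_set_self _ _ _ _ (by omega)]
    by_cases hyy : y = y'
    · subst hyy
      have hzz : z.toNat ≠ z'.toNat := by omega
      rw [getD_set_self _ _ _ _ (by rw [hR]; omega), getD_set_ne _ _ _ _ _ hzz, hR]
    · have : y.toNat ≠ y'.toNat := by omega
      rw [getD_set_ne _ _ _ _ _ this, hR]
  · have : x.toNat ≠ x'.toNat := by omega
    rw [getD_set_ne _ _ _ _ _ this]

-- ---------- B side: the fold fills the table with Wspec ----------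

def CellB (x y z : Int) : Prop := 1 ≤ x ∧ x ≤ 20 ∧ 1 ≤ y ∧ y ≤ 20 ∧ 1 ≤ z ∧ z ≤ 20

def BeforeB (a b c x y z : Int) : Prop := x < a ∨ (x = a ∧ (y < b ∨ (y = b ∧ z < c)))

def InvB (t : List (List (List Int))) (a b c : Int) : Prop :=
  Shape3 t ∧ ∀ x y z, CellB x y z →
    (BeforeB a b c x y z → pvGet3 t x y z = Wspec x y z) ∧
    (¬ BeforeB a b c x y z → pvGet3 t x y z = 0)

lemma bVal_eq_wspec (t : List (List (List Int))) (a b c x y z : Int)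
    (h : InvB t a b c) (hx : x ≤ 20) (hy : y ≤ 20) (hz : z ≤ 20)
    (hb : 1 ≤ x → 1 ≤ y → 1 ≤ z → BeforeB a b c x y z) :
    bVal t x y z = Wspec x y z := by
  by_cases h0 : x ≤ 0 ∨ y ≤ 0 ∨ z ≤ 0
  · unfold bVal
    rw [if_pos h0]
    rw [Wspec, if_pos h0]
  · have hcell : CellB x y z := by unfold CellB; omega
    have hbef := hb (by omega) (by omega) (by omega)
    unfold bVal
    rw [if_neg h0]
    exact (h.2 x y z hcell).1 hbef

lemma stepC (t : List (List (List Int))) (a b c : Int)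
    (ha : 1 ≤ a ∧ a ≤ 20) (hb : 1 ≤ b ∧ b ≤ 20) (hc : 1 ≤ c ∧ c ≤ 20)
    (h : InvB t a b c) :
    InvB (pvSet3 t a b c
      (if a < b ∧ b < c then
        bVal t a b (c - 1) + bVal t a (b - 1) (c - 1) - bVal t a (b - 1) c
      else
        bVal t (a - 1) b c + bVal t (a - 1) (b - 1) c + bVal t (a - 1) b (c - 1)
          - bVal t (a - 1) (b - 1) (c - 1))) a b (c + 1) := by
  have hIa : Ix a := ⟨by omega, by omega⟩
  have hIb : Ix b := ⟨by omega, by omega⟩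
  have hIc : Ix c := ⟨by omega, by omega⟩
  have hV : (if a < b ∧ b < c then
        bVal t a b (c - 1) + bVal t a (b - 1) (c - 1) - bVal t a (b - 1) c
      else
        bVal t (a - 1) b c + bVal t (a - 1) (b - 1) c + bVal t (a - 1) b (c - 1)
          - bVal t (a - 1) (b - 1) (c - 1)) = Wspec a b c := by
    have e1 := bVal_eq_wspec t a b c a b (c - 1) h (by omega) (by omega) (by omega)
      (fun _ _ _ => by unfold BeforeB; omega)
    have e2 := bVal_eq_wspec t a b c a (b - 1) (c - 1) h (by omega) (by omega) (by omega)
      (fun _ _ _ => by unfold BeforeB; omega)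
    have e3 := bVal_eq_wspec t a b c a (b - 1) c h (by omega) (by omega) (by omega)
      (fun _ _ _ => by unfold BeforeB; omega)
    have e4 := bVal_eq_wspec t a b c (a - 1) b c h (by omega) (by omega) (by omega)
      (fun _ _ _ => by unfold BeforeB; omega)
    have e5 := bVal_eq_wspec t a b c (a - 1) (b - 1) c h (by omega) (by omega) (by omega)
      (fun _ _ _ => by unfold BeforeB; omega)
    have e6 := bVal_eq_wspec t a b c (a - 1) b (c - 1) h (by omega) (by omega) (by omega)
      (fun _ _ _ => by unfold BeforeB; omega)
    have e7 := bVal_eq_wspec t a b c (a - 1) (b - 1) (c - 1) h (by omega) (by omega) (by omega)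
      (fun _ _ _ => by unfold BeforeB; omega)
    conv_rhs => rw [Wspec]
    rw [if_neg (by omega : ¬(a ≤ 0 ∨ b ≤ 0 ∨ c ≤ 0)),
        if_neg (by omega : ¬(a > 20 ∨ b > 20 ∨ c > 20))]
    by_cases hlt : a < b ∧ b < c
    · rw [if_pos hlt, if_pos hlt, e1, e2, e3]
    · rw [if_neg hlt, if_neg hlt, e4, e5, e6, e7]
  obtain ⟨hsh, hcells⟩ := h
  rw [hV]
  refine ⟨shape_set3 t a b c _ hsh hIa hIb hIc, ?_⟩
  intro x y z hcell
  obtain ⟨hcx1, hcx2, hcy1, hcy2, hcz1, hcz2⟩ := hcell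
  have hIx : Ix x := ⟨by omega, by omega⟩
  have hIy : Ix y := ⟨by omega, by omega⟩
  have hIz : Ix z := ⟨by omega, by omega⟩
  by_cases heq : a = x ∧ b = y ∧ c = z
  · obtain ⟨rfl, rfl, rfl⟩ := heq
    rw [get3_set3_self t a b c _ hsh hIa hIb hIc]
    constructor
    · intro _; rfl
    · intro hnb; exfalso; apply hnb; unfold BeforeB; omega
  · rw [get3_set3_ne t a b c x y z _ hsh hIa hIb hIc hIx hIy hIz heq]
    constructor
    · intro hbef
      refine (hcells x y z ⟨hcx1, hcx2, hcy1, hcy2, hcz1, hcz2⟩).1 ?_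
      unfold BeforeB at hbef ⊢; omega
    · intro hnb
      refine (hcells x y z ⟨hcx1, hcx2, hcy1, hcy2, hcz1, hcz2⟩).2 ?_
      unfold BeforeB at hnb ⊢; omega

lemma shiftB (t : List (List (List Int))) (a b : Int) (h : InvB t a b 21) :
    InvB t a (b + 1) 1 := by
  obtain ⟨hsh, hc⟩ := h
  refine ⟨hsh, ?_⟩
  intro x y z hcell
  obtain ⟨h1, h2, h3, h4, h5, h6⟩ := hcell
  constructor
  · intro hbef
    refine (hc x y z ⟨h1, h2, h3, h4, h5, h6⟩).1 ?_
    unfold BeforeB at hbef ⊢; omega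
  · intro hnb
    refine (hc x y z ⟨h1, h2, h3, h4, h5, h6⟩).2 ?_
    unfold BeforeB at hnb ⊢; omega

lemma shiftA (t : List (List (List Int))) (a : Int) (h : InvB t a 21 1) :
    InvB t (a + 1) 1 1 := by
  obtain ⟨hsh, hc⟩ := h
  refine ⟨hsh, ?_⟩
  intro x y z hcell
  obtain ⟨h1, h2, h3, h4, h5, h6⟩ := hcell
  constructor
  · intro hbef
    refine (hc x y z ⟨h1, h2, h3, h4, h5, h6⟩).1 ?_
    unfold BeforeB at hbef ⊢; omega
  · intro hnb
    refine (hc x y z ⟨h1, h2, h3, h4, h5, h6⟩).2 ?_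
    unfold BeforeB at hnb ⊢; omega

lemma loopC (n : Nat) : ∀ (s : Nat) (t : List (List (List Int))) (a b : Int),
    1 ≤ s → s + n = 21 → (1 ≤ a ∧ a ≤ 20) → (1 ≤ b ∧ b ≤ 20) → InvB t a b (s : Int) →
    InvB (((List.range' s n).map Int.ofNat).foldl (fun t c =>
        pvSet3 t a b c
          (if a < b ∧ b < c then
            bVal t a b (c - 1) + bVal t a (b - 1) (c - 1) - bVal t a (b - 1) c
          else
            bVal t (a - 1) b c + bVal t (a - 1) (b - 1) c + bVal t (a - 1) b (c - 1)
              - bVal t (a - 1) (b - 1) (c - 1))) t) a b 21 := by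
  induction n with
  | zero =>
    intro s t a b hs hsum ha hb hInv
    have h21 : s = 21 := by omega
    subst h21
    simpa using hInv
  | succ k ih =>
    intro s t a b hs hsum ha hb hInv
    have hexp : List.range' s (k + 1) = s :: List.range' (s + 1) k := List.range'_succ
    rw [hexp]
    simp only [List.map_cons, List.foldl_cons]
    have hstep := stepC t a b (s : Int) ha hb ⟨by omega, by omega⟩ hInv
    have hcast : ((s : Int) + 1) = ((s + 1 : Nat) : Int) := by push_cast; ring
    rw [hcast] at hstep
    exact ih (s + 1) _ a b (by omega) (by omega) ha hb hstep

lemma loopB (n : Nat) : ∀ (s : Nat) (t : List (List (List Int))) (a : Int),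
    1 ≤ s → s + n = 21 → (1 ≤ a ∧ a ≤ 20) → InvB t a (s : Int) 1 →
    InvB (((List.range' s n).map Int.ofNat).foldl (fun t b =>
      ((List.range' 1 20).map Int.ofNat).foldl (fun t c =>
        pvSet3 t a b c
          (if a < b ∧ b < c then
            bVal t a b (c - 1) + bVal t a (b - 1) (c - 1) - bVal t a (b - 1) c
          else
            bVal t (a - 1) b c + bVal t (a - 1) (b - 1) c + bVal t (a - 1) b (c - 1)
              - bVal t (a - 1) (b - 1) (c - 1))) t) t) a 21 1 := by
  induction n with
  | zero =>
    intro s t a hs hsum ha hInv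
    have h21 : s = 21 := by omega
    subst h21
    simpa using hInv
  | succ k ih =>
    intro s t a hs hsum ha hInv
    have hexp : List.range' s (k + 1) = s :: List.range' (s + 1) k := List.range'_succ
    rw [hexp]
    simp only [List.map_cons, List.foldl_cons]
    have hinner := loopC 20 1 t a (s : Int) (by omega) (by omega) ha ⟨by omega, by omega⟩
      (by simpa using hInv)
    have hnext := shiftB _ a (s : Int) hinner
    have hcast : ((s : Int) + 1) = ((s + 1 : Nat) : Int) := by push_cast; ring
    rw [hcast] at hnext
    exact ih (s + 1) _ a (by omega) (by omega) ha hnext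

lemma loopA (n : Nat) : ∀ (s : Nat) (t : List (List (List Int))),
    1 ≤ s → s + n = 21 → InvB t (s : Int) 1 1 →
    InvB (((List.range' s n).map Int.ofNat).foldl (fun t a =>
      ((List.range' 1 20).map Int.ofNat).foldl (fun t b =>
        ((List.range' 1 20).map Int.ofNat).foldl (fun t c =>
          pvSet3 t a b c
            (if a < b ∧ b < c then
              bVal t a b (c - 1) + bVal t a (b - 1) (c - 1) - bVal t a (b - 1) c
            else
              bVal t (a - 1) b c + bVal t (a - 1) (b - 1) c + bVal t (a - 1) b (c - 1)
                - bVal t (a - 1) (b - 1) (c - 1))) t) t) t) 21 1 1 := by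
  induction n with
  | zero =>
    intro s t hs hsum hInv
    have h21 : s = 21 := by omega
    subst h21
    simpa using hInv
  | succ k ih =>
    intro s t hs hsum hInv
    have hexp : List.range' s (k + 1) = s :: List.range' (s + 1) k := List.range'_succ
    rw [hexp]
    simp only [List.map_cons, List.foldl_cons]
    have hinner := loopB 20 1 t (s : Int) (by omega) (by omega) ⟨by omega, by omega⟩
      (by simpa using hInv)
    have hnext := shiftA _ (s : Int) hinner
    have hcast : ((s : Int) + 1) = ((s + 1 : Nat) : Int) := by push_cast; ring
    rw [hcast] at hnext
    exact ih (s + 1) _ (by omega) (by omega) hnext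

lemma pyRange_eq : PySem.List.pyRange 1 21 1 = (List.range' 1 20).map Int.ofNat := by
  decide

lemma invB_init :
    InvB (List.replicate 21 (List.replicate 21 (List.replicate 21 (0 : Int)))) 1 1 1 := by
  refine ⟨shape_rep0, ?_⟩
  intro x y z hcell
  obtain ⟨h1, h2, h3, h4, h5, h6⟩ := hcell
  constructor
  · intro hbef; exfalso; unfold BeforeB at hbef; omega
  · intro _; exact get3_rep0 x y z

lemma bTable_wspec (x y z : Int) (h : CellB x y z) : pvGet3 bTable x y z = Wspec x y z := by
  have hfold := loopA 20 1 (List.replicate 21 (List.replicate 21 (List.replicate 21 (0 : Int))))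
    (by omega) (by omega) (by simpa using invB_init)
  have hbt : InvB bTable 21 1 1 := by
    unfold bTable
    rw [pyRange_eq]
    simpa using hfold
  obtain ⟨h1, h2, h3, h4, h5, h6⟩ := h
  exact (hbt.2 x y z ⟨h1, h2, h3, h4, h5, h6⟩).1 (by unfold BeforeB; omega)

lemma walt_eq_wspec (a b c : Int) : w_alt a b c = Wspec a b c := by
  unfold w_alt
  by_cases h1 : a ≤ 0 ∨ b ≤ 0 ∨ c ≤ 0
  · rw [if_pos h1]
    conv_rhs => rw [Wspec]
    rw [if_pos h1]
  rw [if_neg h1]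
  by_cases h2 : a > 20 ∨ b > 20 ∨ c > 20
  · rw [if_pos h2]
    rw [bTable_wspec 20 20 20 (by unfold CellB; omega)]
    conv_rhs => rw [Wspec]
    rw [if_neg h1, if_pos h2]
  · rw [if_neg h2]
    exact bTable_wspec a b c (by unfold CellB; omega)

-- ---------- A side: the memoized recursion computes Wspec ----------

def GoodA (m : List (List (List Int))) : Prop :=
  Shape3 m ∧ ∀ x y z, Ix x → Ix y → Ix z →
    (pvGet3 m x y z = 0 ∨ pvGet3 m x y z = Wspec x y z)

def UpdA (m m' : List (List (List Int))) : Prop :=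
  ∀ x y z, Ix x → Ix y → Ix z →
    (pvGet3 m' x y z = pvGet3 m x y z ∨ pvGet3 m' x y z = Wspec x y z)

lemma updA_trans {m m' m'' : List (List (List Int))} (h1 : UpdA m m') (h2 : UpdA m' m'') :
    UpdA m m'' := by
  intro x y z hx hy hz
  rcases h2 x y z hx hy hz with h | h
  · rw [h]; exact h1 x y z hx hy hz
  · exact Or.inr h

lemma updA_fix {m m' : List (List (List Int))} (h : UpdA m m') (x y z : Int)
    (hx : Ix x) (hy : Ix y) (hz : Ix z) (hv : pvGet3 m x y z = Wspec x y z) :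
    pvGet3 m' x y z = Wspec x y z := by
  rcases h x y z hx hy hz with h' | h'
  · rw [h', hv]
  · exact h'

lemma store_lemma (m : List (List (List Int))) (x y z : Int)
    (hm : GoodA m) (hx : Ix x) (hy : Ix y) (hz : Ix z) :
    GoodA (pvSet3 m x y z (Wspec x y z)) ∧ UpdA m (pvSet3 m x y z (Wspec x y z)) ∧
      pvGet3 (pvSet3 m x y z (Wspec x y z)) x y z = Wspec x y z := by
  obtain ⟨hsh, hcells⟩ := hm
  have hself := get3_set3_self m x y z (Wspec x y z) hsh hx hy hz
  refine ⟨⟨shape_set3 m x y z _ hsh hx hy hz, ?_⟩, ?_, hself⟩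
  · intro x' y' z' hx' hy' hz'
    by_cases heq : x = x' ∧ y = y' ∧ z = z'
    · obtain ⟨rfl, rfl, rfl⟩ := heq
      exact Or.inr hself
    · rw [get3_set3_ne m x y z x' y' z' _ hsh hx hy hz hx' hy' hz' heq]
      exact hcells x' y' z' hx' hy' hz'
  · intro x' y' z' hx' hy' hz'
    by_cases heq : x = x' ∧ y = y' ∧ z = z'
    · obtain ⟨rfl, rfl, rfl⟩ := heq
      exact Or.inr hself
    · exact Or.inl (get3_set3_ne m x y z x' y' z' _ hsh hx hy hz hx' hy' hz' heq)

lemma wA_main : ∀ (n : Nat) (a b c : Int) (m : List (List (List Int))),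
    μw a b c < n → GoodA m →
    (wA n a b c m).1 = Wspec a b c ∧ GoodA (wA n a b c m).2 ∧ UpdA m (wA n a b c m).2 := by
  intro n
  induction n with
  | zero =>
    intro a b c m hn hg
    exact absurd hn (by omega)
  | succ n ih =>
    intro a b c m hn hg
    rw [wA]
    by_cases h1 : a ≤ 0 ∨ b ≤ 0 ∨ c ≤ 0
    · rw [if_pos h1]
      exact ⟨by conv_rhs => rw [Wspec, if_pos h1], hg, fun x y z _ _ _ => Or.inl rfl⟩
    rw [if_neg h1]
    by_cases h2 : a > 20 ∨ b > 20 ∨ c > 20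
    · rw [if_pos h2]
      dsimp only
      have i20 : Ix (20 : Int) := ⟨by norm_num, le_refl _⟩
      obtain ⟨e1, g1, u1⟩ := ih 20 20 20 m
        (by unfold μw at hn ⊢; split_ifs at hn ⊢ <;> omega) hg
      rw [e1]
      obtain ⟨g2, u2, f2⟩ := store_lemma (wA n 20 20 20 m).2 20 20 20 g1 i20 i20 i20
      refine ⟨?_, g2, updA_trans u1 u2⟩
      rw [f2]
      conv_rhs => rw [Wspec, if_neg h1, if_pos h2]
    rw [if_neg h2]
    have hIa : Ix a := ⟨by omega, by omega⟩
    have hIb : Ix b := ⟨by omega, by omega⟩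
    have hIc : Ix c := ⟨by omega, by omega⟩
    have hIa1 : Ix (a - 1) := ⟨by omega, by omega⟩
    have hIb1 : Ix (b - 1) := ⟨by omega, by omega⟩
    have hIc1 : Ix (c - 1) := ⟨by omega, by omega⟩
    by_cases h3 : pvGet3 m a b c ≠ 0
    · rw [if_pos h3]
      rcases hg.2 a b c hIa hIb hIc with h0 | hval
      · exact absurd h0 h3
      · exact ⟨hval, hg, fun x y z _ _ _ => Or.inl rfl⟩
    rw [if_neg h3]
    by_cases h4 : a < b ∧ b < c
    · rw [if_pos h4]
      dsimp only
      obtain ⟨e1, g1, u1⟩ := ih a b (c - 1) m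
        (by unfold μw at hn ⊢; split_ifs at hn ⊢ <;> omega) hg
      rw [e1]
      obtain ⟨g1', u1', f1⟩ := store_lemma (wA n a b (c - 1) m).2 a b (c - 1) g1 hIa hIb hIc1
      set m1 := pvSet3 (wA n a b (c - 1) m).2 a b (c - 1) (Wspec a b (c - 1)) with hm1
      obtain ⟨e2, g2, u2⟩ := ih a (b - 1) (c - 1) m1
        (by unfold μw at hn ⊢; split_ifs at hn ⊢ <;> omega) g1'
      rw [e2]
      obtain ⟨g2', u2', f2⟩ := store_lemma (wA n a (b - 1) (c - 1) m1).2 a (b - 1) (c - 1) g2 hIa hIb1 hIc1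
      set m2 := pvSet3 (wA n a (b - 1) (c - 1) m1).2 a (b - 1) (c - 1) (Wspec a (b - 1) (c - 1)) with hm2
      obtain ⟨e3, g3, u3⟩ := ih a (b - 1) c m2
        (by unfold μw at hn ⊢; split_ifs at hn ⊢ <;> omega) g2'
      rw [e3]
      obtain ⟨g3', u3', f3⟩ := store_lemma (wA n a (b - 1) c m2).2 a (b - 1) c g3 hIa hIb1 hIc
      set m3 := pvSet3 (wA n a (b - 1) c m2).2 a (b - 1) c (Wspec a (b - 1) c) with hm3
      have r1 : pvGet3 m3 a b (c - 1) = Wspec a b (c - 1) :=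
        updA_fix (updA_trans (updA_trans u2 u2') (updA_trans u3 u3')) a b (c - 1) hIa hIb hIc1 f1
      have r2 : pvGet3 m3 a (b - 1) (c - 1) = Wspec a (b - 1) (c - 1) :=
        updA_fix (updA_trans u3 u3') a (b - 1) (c - 1) hIa hIb1 hIc1 f2
      have r3 : pvGet3 m3 a (b - 1) c = Wspec a (b - 1) c := f3
      refine ⟨?_, g3', updA_trans u1 (updA_trans u1' (updA_trans u2 (updA_trans u2' (updA_trans u3 u3'))))⟩
      rw [r1, r2, r3]
      conv_rhs => rw [Wspec, if_neg h1, if_neg h2, if_pos h4]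
    · rw [if_neg h4]
      dsimp only
      obtain ⟨e1, g1, u1⟩ := ih (a - 1) b c m
        (by unfold μw at hn ⊢; split_ifs at hn ⊢ <;> omega) hg
      rw [e1]
      obtain ⟨g1', u1', f1⟩ := store_lemma (wA n (a - 1) b c m).2 (a - 1) b c g1 hIa1 hIb hIc
      set m1 := pvSet3 (wA n (a - 1) b c m).2 (a - 1) b c (Wspec (a - 1) b c) with hm1
      obtain ⟨e2, g2, u2⟩ := ih (a - 1) (b - 1) c m1
        (by unfold μw at hn ⊢; split_ifs at hn ⊢ <;> omega) g1'
      rw [e2]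
      obtain ⟨g2', u2', f2⟩ := store_lemma (wA n (a - 1) (b - 1) c m1).2 (a - 1) (b - 1) c g2 hIa1 hIb1 hIc
      set m2 := pvSet3 (wA n (a - 1) (b - 1) c m1).2 (a - 1) (b - 1) c (Wspec (a - 1) (b - 1) c) with hm2
      obtain ⟨e3, g3, u3⟩ := ih (a - 1) b (c - 1) m2
        (by unfold μw at hn ⊢; split_ifs at hn ⊢ <;> omega) g2'
      rw [e3]
      obtain ⟨g3', u3', f3⟩ := store_lemma (wA n (a - 1) b (c - 1) m2).2 (a - 1) b (c - 1) g3 hIa1 hIb hIc1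
      set m3 := pvSet3 (wA n (a - 1) b (c - 1) m2).2 (a - 1) b (c - 1) (Wspec (a - 1) b (c - 1)) with hm3
      obtain ⟨e4, g4, u4⟩ := ih (a - 1) (b - 1) (c - 1) m3
        (by unfold μw at hn ⊢; split_ifs at hn ⊢ <;> omega) g3'
      rw [e4]
      obtain ⟨g4', u4', f4⟩ := store_lemma (wA n (a - 1) (b - 1) (c - 1) m3).2 (a - 1) (b - 1) (c - 1) g4 hIa1 hIb1 hIc1
      set m4 := pvSet3 (wA n (a - 1) (b - 1) (c - 1) m3).2 (a - 1) (b - 1) (c - 1) (Wspec (a - 1) (b - 1) (c - 1)) with hm4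
      have r1 : pvGet3 m4 (a - 1) b c = Wspec (a - 1) b c :=
        updA_fix (updA_trans (updA_trans u2 u2') (updA_trans (updA_trans u3 u3') (updA_trans u4 u4')))
          (a - 1) b c hIa1 hIb hIc f1
      have r2 : pvGet3 m4 (a - 1) (b - 1) c = Wspec (a - 1) (b - 1) c :=
        updA_fix (updA_trans (updA_trans u3 u3') (updA_trans u4 u4')) (a - 1) (b - 1) c hIa1 hIb1 hIc f2
      have r3 : pvGet3 m4 (a - 1) b (c - 1) = Wspec (a - 1) b (c - 1) :=
        updA_fix (updA_trans u4 u4') (a - 1) b (c - 1) hIa1 hIb hIc1 f3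
      have r4 : pvGet3 m4 (a - 1) (b - 1) (c - 1) = Wspec (a - 1) (b - 1) (c - 1) := f4
      refine ⟨?_, g4', updA_trans u1 (updA_trans u1' (updA_trans u2 (updA_trans u2'
        (updA_trans u3 (updA_trans u3' (updA_trans u4 u4'))))))⟩
      rw [r1, r2, r3, r4]
      conv_rhs => rw [Wspec, if_neg h1, if_neg h2, if_neg h4]

lemma goodA_dp0 : GoodA pvDp0 := by
  have h : pvDp0 = List.replicate 21 (List.replicate 21 (List.replicate 21 (0 : Int))) := by decide
  rw [h]
  exact ⟨shape_rep0, fun x y z _ _ _ => Or.inl (get3_rep0 x y z)⟩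

-- ===== VERDICT (by name: the statement is the Claim_ definition above) =====
theorem w_spec : Claim_equal_w := by
  unfold Claim_equal_w Spec_w
  intro a b c _
  have h := (wA_main 1001 a b c pvDp0 (by unfold μw; split_ifs <;> omega) goodA_dp0).1
  unfold w
  rw [h, walt_eq_wspec]
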